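-- pv_equiv track=rewrite | github.com/SousaFelipe/ixcpy | example/source.py | merge_source
-- ===== SOURCE A (Python) =====
-- def merge_source(
--         src: list,
--         merge: list,
--         search: str,
--         replace: str) -> list:
--
--     for i, s in enumerate(src):
--         for m in merge:
--             if 'id' in m and m['id'] == s[search]:
--                 s[replace] = m[replace]
--                 break
--
--     return src
-- ===== SOURCE B (Python) =====
-- def merge_source(
--         src: list,
--         merge: list,
--         search: str,
--         replace: str) -> list:
--
--     first = {}
--     for m in merge:
--         if 'id' in m and m['id'] not in first:
--             first[m['id']] = m
--
--     if not first:
--         return src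
--
--     for s in src:
--         m = first.get(s[search])
--         if m is not None:
--             s[replace] = m[replace]
--
--     return src
-- ===== Notes on version B (the rewrite author's own statement) =====
-- stated objective: alternative
-- what changed: Replaces the nested scan of merge for every src row by a single pass that builds a first-occurrence dict id->merge-dict, then one dict lookup per src row.
import Mathlib
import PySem

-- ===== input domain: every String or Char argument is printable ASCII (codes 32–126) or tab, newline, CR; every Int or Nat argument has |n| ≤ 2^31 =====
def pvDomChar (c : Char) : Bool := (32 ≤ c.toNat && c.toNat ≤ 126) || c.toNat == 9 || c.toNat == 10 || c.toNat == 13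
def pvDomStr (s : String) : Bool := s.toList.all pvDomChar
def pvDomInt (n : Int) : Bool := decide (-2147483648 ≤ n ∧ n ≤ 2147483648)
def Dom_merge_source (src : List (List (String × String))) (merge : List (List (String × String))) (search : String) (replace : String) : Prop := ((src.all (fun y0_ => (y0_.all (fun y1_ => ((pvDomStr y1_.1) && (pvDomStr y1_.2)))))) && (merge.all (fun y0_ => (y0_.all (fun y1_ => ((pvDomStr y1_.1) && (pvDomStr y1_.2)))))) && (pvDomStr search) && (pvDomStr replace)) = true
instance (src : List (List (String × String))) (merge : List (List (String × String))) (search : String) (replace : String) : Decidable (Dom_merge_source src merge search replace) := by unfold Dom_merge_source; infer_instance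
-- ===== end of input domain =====

-- B precomputes a first-occurrence dict id -> merge-dict in one pass instead of A's inner scan of
-- merge for every src row (objective: alternative).  Both Pythons mutate the dicts in src in place
-- and return src; the equivalence proved here is about the return value.

-- assoc-list lookup: Python's d[k] / d.get(k) on a dict rendered as a list of pairs (first match)
def pvLook (d : List (String × String)) (k : String) : Option String :=
  match d with
  | [] => none
  | (a, b) :: r => if a == k then some b else pvLook r k

-- Python's 'd[k] = v': overwrite the existing key in place, else append
def pvStore (d : List (String × String)) (k v : String) : List (String × String) :=
  match d with
  | [] => [(k, v)]
  | (a, b) :: r => if a == k then (k, v) :: r else (a, b) :: pvStore r k v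

-- ===== PORT A =====
-- the inner loop: for m in merge: if 'id' in m and m['id'] == s[search]: s[replace] = m[replace]; break
-- (m[replace] is ported as getD ""; under Pre_ the matching dict always carries the replace key)
def pvInnerA (merge : List (List (String × String))) (search : String) (replace : String) (s : List (String × String)) : List (String × String) :=
  match merge with
  | [] => s
  | m :: rest =>
    if (pvLook m "id").isSome && (pvLook m "id" == pvLook s search) then
      pvStore s replace ((pvLook m replace).getD "")
    else pvInnerA rest search replace s

def merge_source (src : List (List (String × String))) (merge : List (List (String × String))) (search : String) (replace : String) : List (List (String × String)) :=
  src.map (fun s => pvInnerA merge search replace s)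

-- ===== PORT B =====
-- first loop of B: for m in merge: if 'id' in m and m['id'] not in first: first[m['id']] = m
def pvBuildFirst (merge : List (List (String × String))) (d : PySem.Dict String (List (String × String))) : PySem.Dict String (List (String × String)) :=
  match merge with
  | [] => d
  | m :: rest =>
    match pvLook m "id" with
    | some i =>
      if PySem.Dict.contains d i then pvBuildFirst rest d
      else pvBuildFirst rest (PySem.Dict.insert d i m)
    | none => pvBuildFirst rest d

-- 'if not first: return src', else one lookup per row; m[replace] is ported as getD "" (see Pre_)
def merge_source_alt (src : List (List (String × String))) (merge : List (List (String × String))) (search : String) (replace : String) : List (List (String × String)) :=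
  let first := pvBuildFirst merge PySem.Dict.empty
  if first.items = [] then src
  else
    src.map (fun s =>
      match pvLook s search with
      | none => s
      | some key =>
        match PySem.Dict.get? first key with
        | some m => pvStore s replace ((pvLook m replace).getD "")
        | none => s)

-- ===== PRECONDITION & SPEC =====
-- Pre_ excludes exactly the inputs where Python A raises a KeyError: (a) some merge dict has 'id'
-- while some src row lacks the search key ('s[search]' raises), or (b) the first merge dict whose
-- id matches a row lacks the replace key ('m[replace]' raises).  B raises on exactly the same inputs.
-- Stated with library first-match lookups (find?): per row, the value bound to search, and the first
-- merge dict whose id-value equals it, which must then carry the replace key.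
def Pre_merge_source (src : List (List (String × String))) (merge : List (List (String × String))) (search : String) (replace : String) : Prop :=
  ((∃ m ∈ merge, "id" ∈ m.map Prod.fst) → ∀ s ∈ src, search ∈ s.map Prod.fst) ∧
  (∀ s ∈ src, ((((s.find? (fun p => p.1 == search)).map Prod.snd).bind
      (fun k => merge.find? (fun m => (m.find? (fun p => p.1 == "id")).map Prod.snd == some k))).all
      (fun m => decide (replace ∈ m.map Prod.fst))) = true)
instance (src : List (List (String × String))) (merge : List (List (String × String))) (search : String) (replace : String) : Decidable (Pre_merge_source src merge search replace) := by unfold Pre_merge_source; infer_instance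

def pvWitness_merge_source : (List (List (String × String))) × (List (List (String × String))) × String × String :=
  ([[("a", "1")]], [[("id", "1"), ("r", "X")]], "a", "r")

def Spec_merge_source (src : List (List (String × String))) (merge : List (List (String × String))) (search : String) (replace : String) (out : List (List (String × String))) : Prop := out = merge_source_alt src merge search replace
instance (src : List (List (String × String))) (merge : List (List (String × String))) (search : String) (replace : String) (out : List (List (String × String))) : Decidable (Spec_merge_source src merge search replace out) := by unfold Spec_merge_source; infer_instance

-- ===== CLAIM (what is proved, stated in full; the proofs are below) =====
def Claim_equal_merge_source : Prop := ∀ (src : List (List (String × String))) (merge : List (List (String × String))) (search : String) (replace : String), Dom_merge_source src merge search replace → Pre_merge_source src merge search replace → Spec_merge_source src merge search replace (merge_source src merge search replace)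

-- ===== LEMMAS AND PROOFS =====

-- first merge dict whose 'id' entry equals k (proof helper)
def pvFirstM (merge : List (List (String × String))) (k : String) : Option (List (String × String)) :=
  match merge with
  | [] => none
  | m :: rest => if pvLook m "id" == some k then some m else pvFirstM rest k

theorem pvInnerA_of_none (merge : List (List (String × String))) (search replace : String)
    (s : List (String × String)) (h : pvLook s search = none) :
    pvInnerA merge search replace s = s := by
  induction merge with
  | nil => rfl
  | cons m rest ih =>
    simp only [pvInnerA, h]
    cases pvLook m "id" <;> simp [ih]

theorem pvInnerA_of_some (merge : List (List (String × String))) (search replace : String)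
    (s : List (String × String)) (k : String) (h : pvLook s search = some k) :
    pvInnerA merge search replace s =
      (match pvFirstM merge k with
       | some m => pvStore s replace ((pvLook m replace).getD "")
       | none => s) := by
  induction merge with
  | nil => rfl
  | cons m rest ih =>
    simp only [pvInnerA, pvFirstM, h]
    cases hm : pvLook m "id" with
    | none => simpa using ih
    | some i =>
      by_cases hik : i = k
      · subst hik; simp
      · simp [hik, ih]

theorem get?_pvBuildFirst (merge : List (List (String × String)))
    (d : PySem.Dict String (List (String × String))) (k : String) :
    PySem.Dict.get? (pvBuildFirst merge d) k =
      Option.or (PySem.Dict.get? d k) (pvFirstM merge k) := by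
  induction merge generalizing d with
  | nil => cases h : PySem.Dict.get? d k <;> simp [pvBuildFirst, pvFirstM, h, Option.or]
  | cons m rest ih =>
    simp only [pvBuildFirst, pvFirstM]
    cases hm : pvLook m "id" with
    | none => simp [ih]
    | some i =>
      by_cases hc : PySem.Dict.contains d i
      · simp only [hc, if_true, ih]
        by_cases hik : i = k
        · subst hik
          have hs : (PySem.Dict.get? d i).isSome := by
            rw [← PySem.Dict.contains_eq_isSome_get?]; exact hc
          cases h : PySem.Dict.get? d i with
          | none => rw [h] at hs; simp at hs
          | some v => simp [Option.or]
        · simp [hik]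
      · simp only [hc, Bool.false_eq_true, if_false]
        by_cases hik : k = i
        · subst hik
          have hn : PySem.Dict.get? d k = none := by
            cases h : PySem.Dict.get? d k with
            | none => rfl
            | some v =>
              exfalso
              have : (PySem.Dict.get? d k).isSome := by simp [h]
              rw [← PySem.Dict.contains_eq_isSome_get?] at this
              simp [this] at hc
          rw [ih, PySem.Dict.get?_insert_self, hn]
          simp [Option.or]
        · rw [ih, PySem.Dict.get?_insert_of_ne _ _ hik]
          have hne : (some i == some k) = false := by
            simp; exact fun h => hik (Eq.symm h)
          simp only [hne, Bool.false_eq_true, if_false]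

-- one src row: A's inner loop equals B's lookup in the built dict
theorem pvRow_eq (merge : List (List (String × String))) (search replace : String)
    (s : List (String × String)) :
    pvInnerA merge search replace s =
      (match pvLook s search with
       | none => s
       | some key =>
         match PySem.Dict.get? (pvBuildFirst merge PySem.Dict.empty) key with
         | some m => pvStore s replace ((pvLook m replace).getD "")
         | none => s) := by
  cases h : pvLook s search with
  | none => simpa using pvInnerA_of_none merge search replace s h
  | some k =>
    rw [pvInnerA_of_some merge search replace s k h]
    have hb := get?_pvBuildFirst merge PySem.Dict.empty k
    rw [PySem.Dict.get?_empty] at hb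
    simp only [Option.or] at hb
    simp [hb]

-- if the built dict is empty, no merge dict has an 'id' that could match, so every row is unchanged
theorem pvRow_id_of_empty (merge : List (List (String × String))) (search replace : String)
    (s : List (String × String))
    (h : (pvBuildFirst merge PySem.Dict.empty).items = []) :
    pvInnerA merge search replace s = s := by
  rw [pvRow_eq]
  cases hk : pvLook s search with
  | none => rfl
  | some k =>
    have hg : PySem.Dict.get? (pvBuildFirst merge PySem.Dict.empty) k = none := by
      cases hd : pvBuildFirst merge PySem.Dict.empty with
      | mk items => rw [hd] at h; subst h; rfl
    simp [hg]

-- ===== VERDICT (by name: the statement is the Claim_ definition above) =====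
theorem merge_source_spec : Claim_equal_merge_source := by
  intro src merge search replace _ _
  unfold Spec_merge_source merge_source merge_source_alt
  by_cases h : (pvBuildFirst merge PySem.Dict.empty).items = []
  · rw [if_pos h, List.map_congr_left (fun s _ => pvRow_id_of_empty merge search replace s h),
        List.map_id']
  · rw [if_neg h]
    exact List.map_congr_left (fun s _ => pvRow_eq merge search replace s)
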